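-- pv_equiv track=rewrite | github.com/liangmuxue/SLFCD | utils/constance.py | get_combine_label_dict
-- ===== SOURCE A (Python) =====
-- Combine_Label_Dict_hsil = [
--     {"code": 1, "type": "hsil"},
--     {"code": 0, "type": "normal"}
-- ]
--
-- Combine_Label_Dict_lsil = [
--     {"code": 1, "type": "lsil"},
--     {"code": 0, "type": "normal"}
-- ]
--
-- Combine_Label_Dict_ais = [
--     {"code": 1, "type": "ais"},
--     {"code": 0, "type": "normal"}
-- ]
--
-- def get_combine_label_dict(mode):
--     dict = {}
--     if mode == 'hsil':
--         for item in Combine_Label_Dict_hsil: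
--             dict[item["type"]] = item["code"]
--     if mode == 'lsil':
--         for item in Combine_Label_Dict_lsil:
--             dict[item["type"]] = item["code"]
--     if mode == 'ais':
--         for item in Combine_Label_Dict_ais:
--             dict[item["type"]] = item["code"]
--     return dict
-- ===== SOURCE B (Python) =====
-- def get_combine_label_dict(mode):
--     if mode in ('hsil', 'lsil', 'ais'):
--         return {mode: 1, 'normal': 0}
--     return {}
-- ===== Notes on version B (the rewrite author's own statement) =====
-- stated objective: simpler
-- what changed: Replaces three branches that each loop over a constant list-of-dicts with a single membership test returning the known result dict as a literal.
import Mathlib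
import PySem

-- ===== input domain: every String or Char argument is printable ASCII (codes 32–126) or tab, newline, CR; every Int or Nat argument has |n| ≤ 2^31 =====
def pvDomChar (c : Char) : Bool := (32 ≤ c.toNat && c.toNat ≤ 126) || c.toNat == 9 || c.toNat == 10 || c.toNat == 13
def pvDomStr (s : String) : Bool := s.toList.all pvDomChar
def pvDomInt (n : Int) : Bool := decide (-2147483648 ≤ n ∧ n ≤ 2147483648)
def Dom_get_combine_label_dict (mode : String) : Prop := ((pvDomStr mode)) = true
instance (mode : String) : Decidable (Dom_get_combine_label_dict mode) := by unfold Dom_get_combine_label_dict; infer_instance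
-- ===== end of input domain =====

-- ===== PORT A =====
-- B replaces A's three loop-over-constant-list branches with one membership test returning a literal dict (objective: simpler).
-- module constants: each item {"code": c, "type": t} is ported as the pair (c, t)
def Combine_Label_Dict_hsil : List (Int × String) := [(1, "hsil"), (0, "normal")]
def Combine_Label_Dict_lsil : List (Int × String) := [(1, "lsil"), (0, "normal")]
def Combine_Label_Dict_ais : List (Int × String) := [(1, "ais"), (0, "normal")]

def get_combine_label_dict (mode : String) : List (String × Int) :=
  let dict : PySem.Dict String Int := PySem.Dict.empty
  let dict := if mode = "hsil" then
      Combine_Label_Dict_hsil.foldl (fun d item => d.insert item.2 item.1) dict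
    else dict
  let dict := if mode = "lsil" then
      Combine_Label_Dict_lsil.foldl (fun d item => d.insert item.2 item.1) dict
    else dict
  let dict := if mode = "ais" then
      Combine_Label_Dict_ais.foldl (fun d item => d.insert item.2 item.1) dict
    else dict
  dict.items

-- ===== PORT B =====
def get_combine_label_dict_alt (mode : String) : List (String × Int) :=
  if mode ∈ ["hsil", "lsil", "ais"] then [(mode, 1), ("normal", 0)]
  else []

-- ===== PRECONDITION & SPEC =====
def Spec_get_combine_label_dict (mode : String) (out : List (String × Int)) : Prop := out = get_combine_label_dict_alt mode
instance (mode : String) (out : List (String × Int)) : Decidable (Spec_get_combine_label_dict mode out) := by unfold Spec_get_combine_label_dict; infer_instance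

-- ===== CLAIM (what is proved, stated in full; the proofs are below) =====
def Claim_equal_get_combine_label_dict : Prop := ∀ (mode : String), Dom_get_combine_label_dict mode → Spec_get_combine_label_dict mode (get_combine_label_dict mode)

-- ===== LEMMAS AND PROOFS =====

-- ===== VERDICT (by name: the statement is the Claim_ definition above) =====
theorem get_combine_label_dict_spec : Claim_equal_get_combine_label_dict := by
  intro mode _
  unfold Spec_get_combine_label_dict get_combine_label_dict get_combine_label_dict_alt
  by_cases h1 : mode = "hsil" <;> by_cases h2 : mode = "lsil" <;> by_cases h3 : mode = "ais" <;>
    subst_vars <;> simp_all <;> decide
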